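-- pv_equiv track=rewrite | github.com/saloaaro/TIRA1 | playlist.py | count_parts
-- ===== SOURCE A (Python) =====
-- def count_parts(songs):
--     p = {}
--     l = 0
--     c = 0
--
--     for i, v in enumerate(songs):
--         if v in p:
--             l = max(l, p[v] + 1)
--         p[v] = i
--         c += i - l + 1
--
--     return c
-- ===== SOURCE B (Python) =====
-- def count_parts(songs):
--     seen = set()
--     l = 0
--     c = 0
--     for i, v in enumerate(songs):
--         while v in seen:
--             seen.remove(songs[l])
--             l += 1
--         seen.add(v)
--         c += i - l + 1
--     return c
-- ===== Notes on version B (the rewrite author's own statement) =====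
-- stated objective: alternative
-- what changed: Replaces the dict of last-seen indices (left pointer jumps via max(l, p[v]+1)) by a set of the elements currently in the window, shrinking the window one element at a time with an inner while-loop before each insertion.
import Mathlib
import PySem

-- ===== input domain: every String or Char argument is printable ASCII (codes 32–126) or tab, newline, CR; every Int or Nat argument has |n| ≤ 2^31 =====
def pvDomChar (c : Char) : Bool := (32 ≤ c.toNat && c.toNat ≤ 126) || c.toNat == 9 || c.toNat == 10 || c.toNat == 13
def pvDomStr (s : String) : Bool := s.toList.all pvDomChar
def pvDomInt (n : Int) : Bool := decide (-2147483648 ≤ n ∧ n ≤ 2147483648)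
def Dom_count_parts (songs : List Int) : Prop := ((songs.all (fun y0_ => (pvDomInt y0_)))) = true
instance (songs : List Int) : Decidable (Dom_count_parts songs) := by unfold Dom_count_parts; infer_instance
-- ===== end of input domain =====

-- B replaces A's dict of last-seen indices (left pointer jumps via max(l, p[v]+1)) by a set of the
-- elements currently in the window, advancing the left pointer one step at a time with an inner
-- while-loop; same return value, different data structure and control flow.

-- ===== PORT A =====
-- the body of A's for-loop, named so the fold below can refer to it
def stepA (st : PySem.Dict Int Int × Int × Int) (iv : Int × Int) : PySem.Dict Int Int × Int × Int :=
  let l := match st.1.get? iv.2 with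
           | some j => max st.2.1 (j + 1)
           | none => st.2.1
  (st.1.insert iv.2 iv.1, l, st.2.2 + iv.1 - l + 1)

def count_parts (songs : List Int) : Int :=
  ((PySem.List.enumerate songs 0).foldl stepA (PySem.Dict.empty, 0, 0)).2.2

-- ===== PORT B =====
-- the 'while v in seen: seen.remove(songs[l]); l += 1' loop of Source B; the out-of-range branch is a
-- totality guard only (Python's songs[l] would raise IndexError there; seen.remove = Set.discard
-- when the element is present, which the while-condition guarantees)
def shrinkB (songs : List Int) (v : Int) (seen : PySem.Set Int) (l : Nat) : PySem.Set Int × Nat :=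
  if v ∈ seen then
    if h : l < songs.length then
      shrinkB songs v (PySem.Set.discard seen songs[l]) (l + 1)
    else (seen, l)
  else (seen, l)
termination_by songs.length - l

def stepB (songs : List Int) (st : PySem.Set Int × Nat × Int) (iv : Int × Int) : PySem.Set Int × Nat × Int :=
  let r := shrinkB songs iv.2 st.1 st.2.1
  (PySem.Set.add r.1 iv.2, r.2, st.2.2 + iv.1 - (r.2 : Int) + 1)

def count_parts_alt (songs : List Int) : Int :=
  ((PySem.List.enumerate songs 0).foldl (stepB songs) (PySem.Set.empty, 0, 0)).2.2

-- ===== PRECONDITION & SPEC =====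
def Spec_count_parts (songs : List Int) (out : Int) : Prop := out = count_parts_alt songs
instance (songs : List Int) (out : Int) : Decidable (Spec_count_parts songs out) := by unfold Spec_count_parts; infer_instance

-- ===== CLAIM (what is proved, stated in full; the proofs are below) =====
def Claim_equal_count_parts : Prop := ∀ (songs : List Int), Dom_count_parts songs → Spec_count_parts songs (count_parts songs)

-- ===== LEMMAS AND PROOFS =====

-- the window songs[l:i]
def Win (songs : List Int) (l i : Nat) : List Int := (songs.take i).drop l

lemma Win_getElem? (songs : List Int) (l i k : Nat) (h : l + k < i) :
    (Win songs l i)[k]? = songs[l + k]? := by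
  simp [Win, List.getElem?_drop, h]

lemma mem_Win {songs : List Int} {l i : Nat} {x : Int} (hi : i ≤ songs.length) :
    x ∈ Win songs l i ↔ ∃ j : Nat, l ≤ j ∧ j < i ∧ songs[j]? = some x := by
  rw [List.mem_iff_getElem?]
  constructor
  · rintro ⟨k, hk⟩
    have hlen : (Win songs l i).length = min i songs.length - l := by simp [Win]
    have hk' : k < (Win songs l i).length := by
      by_contra hh
      rw [List.getElem?_eq_none (by omega)] at hk
      exact (by simp at hk)
    refine ⟨l + k, by omega, by omega, ?_⟩
    rw [← Win_getElem? songs l i k (by omega)]; exact hk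
  · rintro ⟨j, h1, h2, h3⟩
    exact ⟨j - l, by rw [Win_getElem? songs l i _ (by omega)]; rwa [Nat.add_sub_cancel' h1]⟩

lemma Win_cons {songs : List Int} {l i : Nat} (hl : l < i) (hi : i ≤ songs.length) :
    Win songs l i = songs[l]'(by omega) :: Win songs (l+1) i := by
  unfold Win
  rw [List.drop_eq_getElem_cons (by simp; omega)]
  congr 1
  simp [List.getElem_take]

lemma Win_snoc {songs : List Int} {l i : Nat} (hl : l ≤ i) (hi : i < songs.length) :
    Win songs l (i+1) = Win songs l i ++ [songs[i]] := by
  unfold Win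
  rw [List.take_add_one, List.drop_append_of_le_length (by simp; omega)]
  simp [List.getElem?_eq_getElem hi]

lemma Win_drop (songs : List Int) (l d i : Nat) :
    (Win songs l i).drop d = Win songs (l + d) i := by
  simp [Win, List.drop_drop]

lemma Win_uniq {songs : List Int} {l i j j' : Nat} {v : Int}
    (hnd : (Win songs l i).Nodup) (hi : i ≤ songs.length)
    (h1 : l ≤ j) (h2 : j < i) (h3 : l ≤ j') (h4 : j' < i)
    (e1 : songs[j]? = some v) (e2 : songs[j']? = some v) : j = j' := by
  have g1 : (Win songs l i)[j - l]? = some v := by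
    rw [Win_getElem? songs l i _ (by omega), Nat.add_sub_cancel' h1]; exact e1
  have g2 : (Win songs l i)[j' - l]? = some v := by
    rw [Win_getElem? songs l i _ (by omega), Nat.add_sub_cancel' h3]; exact e2
  have := List.getElem?_inj (xs := Win songs l i) (by
    by_contra hh
    rw [List.getElem?_eq_none (by omega)] at g1
    exact (by simp at g1)) hnd (g1.trans g2.symm)
  omega

lemma shrinkB_not_mem {songs : List Int} {v : Int} {seen : PySem.Set Int} {l : Nat}
    (h : v ∉ seen) : shrinkB songs v seen l = (seen, l) := by
  rw [shrinkB]; simp [h]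

lemma shrinkB_spec {songs : List Int} {v : Int} {i : Nat} :
    ∀ (k l : Nat) (seen : PySem.Set Int), i - l ≤ k → l ≤ i → i ≤ songs.length →
    (∀ x, x ∈ seen ↔ x ∈ Win songs l i) → (Win songs l i).Nodup → v ∈ seen →
    ∃ j : Nat, l ≤ j ∧ j < i ∧ songs[j]? = some v ∧
      (shrinkB songs v seen l).2 = j + 1 ∧
      (∀ x, x ∈ (shrinkB songs v seen l).1 ↔ x ∈ Win songs (j+1) i) := by
  intro k
  induction k with
  | zero =>
    intro l seen hk hl hi hmem hnd hv
    rcases (mem_Win hi).1 ((hmem v).1 hv) with ⟨j, hj1, hj2, _⟩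
    omega
  | succ k ih =>
    intro l seen hk hl hi hmem hnd hv
    have hli : l < i := by
      rcases (mem_Win hi).1 ((hmem v).1 hv) with ⟨j, hj1, hj2, _⟩; omega
    have hln : l < songs.length := by omega
    have hwin := Win_cons hli hi
    have hmem' : ∀ x, x ∈ PySem.Set.discard seen songs[l] ↔ x ∈ Win songs (l+1) i := by
      intro x
      rw [PySem.Set.mem_discard, hmem x, hwin]
      have hhead : songs[l] ∉ Win songs (l+1) i := by
        rw [hwin] at hnd; exact (List.nodup_cons.1 hnd).1
      constructor
      · rintro ⟨hx, hne⟩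
        rcases List.mem_cons.1 hx with h | h
        · exact absurd h hne
        · exact h
      · intro hx
        exact ⟨List.mem_cons_of_mem _ hx, fun e => hhead (e ▸ hx)⟩
    have hnd' : (Win songs (l+1) i).Nodup := by
      rw [hwin] at hnd; exact (List.nodup_cons.1 hnd).2
    rw [shrinkB, if_pos hv, dif_pos hln]
    by_cases hvl : v = songs[l]
    · -- loop stops at l+1
      have hnot : v ∉ PySem.Set.discard seen songs[l] := by
        rw [PySem.Set.mem_discard]; intro ⟨_, hne⟩; exact hne hvl
      rw [shrinkB_not_mem hnot]
      exact ⟨l, le_refl l, hli, by rw [List.getElem?_eq_getElem hln, hvl], rfl,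
        fun x => hmem' x⟩
    · have hv' : v ∈ PySem.Set.discard seen songs[l] := by
        rw [PySem.Set.mem_discard]; exact ⟨hv, hvl⟩
      rcases ih (l+1) _ (by omega) (by omega) hi hmem' hnd' hv' with
        ⟨j, hj1, hj2, hj3, hj4, hj5⟩
      exact ⟨j, by omega, hj2, hj3, hj4, hj5⟩

lemma mainLoop (songs : List Int) : ∀ (rest : List Int) (i l : Nat) (p : PySem.Dict Int Int)
    (seen : PySem.Set Int) (c : Int),
    songs.drop i = rest → l ≤ i → i ≤ songs.length →
    (∀ x, x ∈ seen ↔ x ∈ Win songs l i) →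
    (Win songs l i).Nodup →
    (∀ v ∈ Win songs l i, ∃ j : Nat, l ≤ j ∧ j < i ∧ songs[j]? = some v ∧ p.get? v = some (j:Int)) →
    (∀ v z, p.get? v = some z → (l:Int) ≤ z → v ∈ Win songs l i) →
    ((PySem.List.enumerate rest (i:Int)).foldl stepA (p, (l:Int), c)).2.2
      = ((PySem.List.enumerate rest (i:Int)).foldl (stepB songs) (seen, l, c)).2.2 := by
  intro rest
  induction rest with
  | nil => intro i l p seen c _ _ _ _ _ _ _; simp [PySem.List.enumerate_nil]
  | cons x rest' ih =>
    intro i l p seen c hdrop hl hi hmem hnd hD hE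
    have hin : i < songs.length := by
      by_contra hh
      rw [List.drop_eq_nil_of_le (by omega)] at hdrop
      exact (by simp at hdrop)
    have hxd := List.drop_eq_getElem_cons hin
    rw [hxd] at hdrop
    obtain ⟨h1, h2⟩ := List.cons_eq_cons.mp hdrop
    have hx : x = songs[i] := h1.symm
    have hrest' : songs.drop (i+1) = rest' := h2
    rw [PySem.List.enumerate_cons, List.foldl_cons, List.foldl_cons]
    have hcast : (i:Int) + 1 = ((i+1 : Nat) : Int) := by omega
    by_cases hxs : x ∈ seen
    · -- window contains x: A jumps, B shrinks to the same place
      rcases shrinkB_spec (v := x) (i := i) (i - l) l seen (le_refl _) hl (by omega)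
          hmem hnd hxs with ⟨j, hj1, hj2, hj3, hj4, hj5⟩
      have hxW : x ∈ Win songs l i := (hmem x).1 hxs
      rcases hD x hxW with ⟨j', hj'1, hj'2, hj'3, hj'4⟩
      have hjj : j' = j := Win_uniq hnd (by omega) hj'1 hj'2 hj1 hj2 hj'3 hj3
      subst hjj
      have hmax : max (l:Int) ((j':Int) + 1) = ((j'+1 : Nat) : Int) := by
        push_cast
        rw [max_eq_right (by exact_mod_cast Nat.le_succ_of_le hj'1)]
      have hA : stepA (p, (l:Int), c) ((i:Int), x)
          = (p.insert x (i:Int), ((j'+1 : Nat):Int), c + (i:Int) - ((j'+1 : Nat):Int) + 1) := by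
        simp [stepA, hj'4, hmax]
      have hB : stepB songs (seen, l, c) ((i:Int), x)
          = (PySem.Set.add (shrinkB songs x seen l).1 x, j'+1,
             c + (i:Int) - ((j'+1 : Nat):Int) + 1) := by
        simp [stepB, hj4]
      rw [hA, hB, hcast]
      -- window facts at the new left bound j'+1
      have hwsub : Win songs (j'+1) i = (Win songs l i).drop (j'+1-l) := by
        rw [Win_drop]; congr 1; omega
      have hndsub : (Win songs (j'+1) i).Nodup := by
        rw [hwsub]; exact hnd.sublist (List.drop_sublist _ _)
      have hxnot : x ∉ Win songs (j'+1) i := by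
        intro hxm
        rcases (mem_Win (by omega)).1 hxm with ⟨j2, hq1, hq2, hq3⟩
        have := Win_uniq hnd (by omega) (by omega) hq2 hj1 hj2 hq3 hj3
        omega
      have hsnoc := Win_snoc (l := j'+1) (i := i) (by omega) hin
      apply ih (i+1) (j'+1) _ _ _ hrest' (by omega) (by omega)
      · intro y
        rw [PySem.Set.mem_add, hj5 y, hsnoc]
        simp [hx, or_comm]
      · rw [hsnoc, ← hx]
        refine List.Nodup.append hndsub (List.nodup_singleton _) ?_
        intro a ha hb
        simp at hb; subst hb; exact hxnot ha
      · intro v hv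
        rw [hsnoc, List.mem_append] at hv
        by_cases hvx : v = x
        · subst hvx
          exact ⟨i, by omega, by omega, by rw [List.getElem?_eq_getElem hin, hx],
            by rw [PySem.Dict.get?_insert_self]⟩
        · have hvW' : v ∈ Win songs (j'+1) i := by
            rcases hv with h | h
            · exact h
            · simp at h; rw [← hx] at h; exact absurd h hvx
          rcases (mem_Win (by omega)).1 hvW' with ⟨j2, hq1, hq2, hq3⟩
          have hvW : v ∈ Win songs l i := (mem_Win (by omega)).2 ⟨j2, by omega, hq2, hq3⟩
          rcases hD v hvW with ⟨jv, hv1, hv2, hv3, hv4⟩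
          have : jv = j2 := Win_uniq hnd (by omega) hv1 hv2 (by omega) hq2 hv3 hq3
          exact ⟨jv, by omega, by omega, hv3, by rw [PySem.Dict.get?_insert_of_ne p _ hvx]; exact hv4⟩
      · intro v z hz hlz
        by_cases hvx : v = x
        · subst hvx
          rw [hsnoc, ← hx]; simp
        · rw [PySem.Dict.get?_insert_of_ne p _ hvx] at hz
          have hvW : v ∈ Win songs l i := hE v z hz (by
            have : (l:Int) ≤ ((j'+1 : Nat):Int) := by exact_mod_cast Nat.le_succ_of_le hj'1
            omega)
          rcases hD v hvW with ⟨jv, hv1, hv2, hv3, hv4⟩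
          have hzjv : z = (jv:Int) := by rw [hv4] at hz; injection hz with h; exact h.symm
          have hjvge : j'+1 ≤ jv := by
            rw [hzjv] at hlz; exact_mod_cast hlz
          rw [hsnoc, List.mem_append]
          exact Or.inl ((mem_Win (by omega)).2 ⟨jv, hjvge, hv2, hv3⟩)
    · -- x not in the window: both keep l
      have hxW : x ∉ Win songs l i := fun h => hxs ((hmem x).2 h)
      have hA : stepA (p, (l:Int), c) ((i:Int), x)
          = (p.insert x (i:Int), (l:Int), c + (i:Int) - (l:Int) + 1) := by
        cases hp : p.get? x with
        | none => simp [stepA, hp]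
        | some z =>
          have hzl : z < (l:Int) := by
            by_contra hh
            exact hxW (hE x z hp (by omega))
          simp [stepA, hp, max_eq_left (by omega : z + 1 ≤ (l:Int))]
      have hB : stepB songs (seen, l, c) ((i:Int), x)
          = (PySem.Set.add seen x, l, c + (i:Int) - (l:Int) + 1) := by
        simp [stepB, shrinkB_not_mem hxs]
      rw [hA, hB, hcast]
      have hsnoc := Win_snoc (l := l) (i := i) hl hin
      apply ih (i+1) l _ _ _ hrest' (by omega) (by omega)
      · intro y
        rw [PySem.Set.mem_add, hmem y, hsnoc]
        simp [hx, or_comm]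
      · rw [hsnoc, ← hx]
        refine List.Nodup.append hnd (List.nodup_singleton _) ?_
        intro a ha hb
        simp at hb; subst hb; exact hxW ha
      · intro v hv
        rw [hsnoc, List.mem_append] at hv
        by_cases hvx : v = x
        · subst hvx
          exact ⟨i, by omega, by omega,
            by rw [List.getElem?_eq_getElem hin, hx],
            by rw [PySem.Dict.get?_insert_self]⟩
        · have hvW : v ∈ Win songs l i := by
            rcases hv with h | h
            · exact h
            · simp at h; rw [← hx] at h; exact absurd h hvx
          rcases hD v hvW with ⟨jv, hv1, hv2, hv3, hv4⟩
          exact ⟨jv, hv1, by omega, hv3, by rw [PySem.Dict.get?_insert_of_ne p _ hvx]; exact hv4⟩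
      · intro v z hz hlz
        by_cases hvx : v = x
        · subst hvx
          rw [hsnoc, ← hx]; simp
        · rw [PySem.Dict.get?_insert_of_ne p _ hvx] at hz
          rw [hsnoc, List.mem_append]
          exact Or.inl (hE v z hz hlz)

-- ===== VERDICT (by name: the statement is the Claim_ definition above) =====
theorem count_parts_spec : Claim_equal_count_parts := by
  intro songs _
  unfold Spec_count_parts count_parts count_parts_alt
  have h := mainLoop songs songs 0 0 PySem.Dict.empty PySem.Set.empty 0
    rfl (le_refl 0) (Nat.zero_le _)
    (by intro x; simp [Win, PySem.Set.empty])
    (by simp [Win])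
    (by intro v hv; simp [Win] at hv)
    (by intro v z hz; simp [PySem.Dict.empty, PySem.Dict.get?] at hz)
  simpa using h
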